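-- pv_equiv track=rewrite | github.com/VetleVatnem/Git-4-dummies | TicTacToe.py | scan_rad
-- ===== SOURCE A (Python) =====
-- def scan_rad(rad , n):
--
--     for i in range(len(rad)-n+1):
--         x = 1
--         for j in range(n-1):
--             if rad[j+i] == rad[j+i+1] == 'O' or rad[j+i] == rad[j+i+1] == 'X':
--                 x += 1
--                 spiller = rad[i+j]
--                 if x == n:
--                     return True , 'Running' if spiller == 'O' else 'Kryss'
--
--     return False , '*'
-- ===== SOURCE B (Python) =====
-- def scan_rad(rad, n):
--     if n < 2:
--         return False, '*'
--     run = 1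
--     for i in range(1, len(rad)):
--         run = run + 1 if rad[i] == rad[i - 1] else 1
--         if run >= n and rad[i] in 'OX':
--             return True, 'Running' if rad[i] == 'O' else 'Kryss'
--     return False, '*'
-- ===== Notes on version B (the rewrite author's own statement) =====
-- stated objective: faster
-- what changed: Replaced A's window-by-window scan (which re-checks up to n-1 adjacent pairs for every start position) with a single left-to-right pass that maintains the run length of consecutive equal characters and fires as soon as a run of n 'O's or 'X's is complete.
import Mathlib
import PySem

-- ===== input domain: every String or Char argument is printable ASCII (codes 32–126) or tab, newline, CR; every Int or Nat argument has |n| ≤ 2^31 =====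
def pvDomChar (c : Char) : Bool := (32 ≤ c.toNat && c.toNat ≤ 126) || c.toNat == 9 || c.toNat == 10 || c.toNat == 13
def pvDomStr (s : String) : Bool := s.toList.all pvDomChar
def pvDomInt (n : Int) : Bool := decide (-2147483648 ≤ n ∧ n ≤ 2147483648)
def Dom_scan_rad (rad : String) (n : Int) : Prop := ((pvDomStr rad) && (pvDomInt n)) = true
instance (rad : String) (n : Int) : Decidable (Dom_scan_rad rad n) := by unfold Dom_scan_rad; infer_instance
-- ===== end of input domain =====

-- B replaces A's O(len·n) window-by-window pair scan with a single O(len) run-length pass; equal return values proved for all inputs.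

-- ===== PORT A =====
-- Inner loop 'for j in range(n-1)': x counts matching adjacent pairs, early return when x reaches n.
-- All indices reached are in range in Python, so pyGetD with a dummy default is exact here.
def scanAInner (cs : List Char) (i n : Int) (x : Int) : List Int → Option (Bool × String)
  | [] => none
  | j :: js =>
    -- chained comparison: rad[j+i] == rad[j+i+1] == 'O'  or  rad[j+i] == rad[j+i+1] == 'X'
    if ((PySem.List.pyGetD cs (j+i) ' ' == PySem.List.pyGetD cs (j+i+1) ' ')
          && (PySem.List.pyGetD cs (j+i+1) ' ' == 'O'))
       || ((PySem.List.pyGetD cs (j+i) ' ' == PySem.List.pyGetD cs (j+i+1) ' ')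
          && (PySem.List.pyGetD cs (j+i+1) ' ' == 'X')) then
      -- x += 1; spiller = rad[i+j]; if x == n: return …
      if x + 1 == n then
        some (true, if PySem.List.pyGetD cs (i+j) ' ' == 'O' then "Running" else "Kryss")
      else scanAInner cs i n (x+1) js
    else scanAInner cs i n x js

-- Outer loop 'for i in range(len(rad)-n+1)'
def scanAOuter (cs : List Char) (n : Int) : List Int → Bool × String
  | [] => (false, "*")
  | i :: is =>
    match scanAInner cs i n 1 (PySem.List.pyRange 0 (n-1)) with
    | some r => r
    | none => scanAOuter cs n is

def scan_rad (rad : String) (n : Int) : Bool × String :=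
  scanAOuter rad.toList n (PySem.List.pyRange 0 (PySem.Str.len rad - n + 1))

-- ===== PORT B =====
-- run = length of the current run of equal characters ending at the current position
def scanBLoop (n : Int) (run : Int) (prev : Char) : List Char → Bool × String
  | [] => (false, "*")
  | c :: rest =>
    let run' := if c == prev then run + 1 else 1
    if n ≤ run' ∧ (c == 'O' || c == 'X') = true then
      (true, if c == 'O' then "Running" else "Kryss")
    else scanBLoop n run' c rest

def scan_rad_alt (rad : String) (n : Int) : Bool × String :=
  if n < 2 then (false, "*")
  else
    match rad.toList with
    | [] => (false, "*")
    | c :: rest => scanBLoop n 1 c rest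

-- ===== PRECONDITION & SPEC =====
def Spec_scan_rad (rad : String) (n : Int) (out : Bool × String) : Prop := out = scan_rad_alt rad n
instance (rad : String) (n : Int) (out : Bool × String) : Decidable (Spec_scan_rad rad n out) := by unfold Spec_scan_rad; infer_instance

-- ===== CLAIM (what is proved, stated in full; the proofs are below) =====
def Claim_equal_scan_rad : Prop := ∀ (rad : String) (n : Int), Dom_scan_rad rad n → Spec_scan_rad rad n (scan_rad rad n)

-- ===== LEMMAS AND PROOFS =====

-- proof-side abbreviations (Nat indices)
def pvCh (cs : List Char) (k : Nat) : Char := cs.getD k ' '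
def pvOk (c : Char) : Bool := c == 'O' || c == 'X'
def pvCond (cs : List Char) (k : Nat) : Bool :=
  (pvCh cs k == pvCh cs (k+1)) && pvOk (pvCh cs (k+1))
-- window of n1 pairs starting at i
def pvW (cs : List Char) (n1 i : Nat) : Bool := (List.range n1).all (fun t => pvCond cs (i+t))
-- length of the run of equal characters ending at q
def pvRun (cs : List Char) : Nat → Nat
  | 0 => 1
  | q+1 => if pvCh cs (q+1) == pvCh cs q then pvRun cs q + 1 else 1
def pvOut (c : Char) : Bool × String := (true, if c == 'O' then "Running" else "Kryss")
-- reference first-hit scans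
def pvAFind (cs : List Char) (n1 : Nat) : Nat → Nat → Bool × String
  | _, 0 => (false, "*")
  | i, M+1 => if pvW cs n1 i then pvOut (pvCh cs (i+n1)) else pvAFind cs n1 (i+1) M
def pvBFind (cs : List Char) (n1 : Nat) (q : Nat) : Bool × String :=
  if h : q < cs.length then
    (if n1 + 1 ≤ pvRun cs q ∧ pvOk (pvCh cs q) = true then pvOut (pvCh cs q)
     else pvBFind cs n1 (q+1))
  else (false, "*")
termination_by cs.length - q

theorem pvRun_le (cs : List Char) (q : Nat) : pvRun cs q ≤ q + 1 := by
  induction q with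
  | zero => simp [pvRun]
  | succ q ih => simp only [pvRun]; split <;> omega

theorem pvRun_pos (cs : List Char) (q : Nat) : 1 ≤ pvRun cs q := by
  cases q <;> simp only [pvRun] <;> first | omega | (split <;> omega)

theorem pvRun_ge_iff (cs : List Char) (i n1 : Nat) :
    n1 + 1 ≤ pvRun cs (i + n1) ↔ ∀ t < n1, pvCh cs (i+t) = pvCh cs (i+t+1) := by
  induction n1 with
  | zero => simpa using pvRun_pos cs i
  | succ n1 ih =>
    have h1 : i + (n1+1) = (i + n1) + 1 := by omega
    rw [h1]
    simp only [pvRun]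
    by_cases he : pvCh cs (i + n1 + 1) = pvCh cs (i + n1)
    · rw [if_pos (by simp [he])]
      constructor
      · intro h t ht
        rcases Nat.lt_succ_iff_lt_or_eq.mp ht with h' | h'
        · exact (ih.mp (by omega)) t h'
        · subst h'; rw [← h1]; exact he.symm
      · intro h
        have := ih.mpr (fun t ht => h t (by omega))
        omega
    · rw [if_neg (by simpa using he)]
      constructor
      · omega
      · intro h
        exact absurd ((h n1 (by omega)).symm) (by rw [← h1] at he; exact he)

theorem pvChain (cs : List Char) (i n1 : Nat)
    (h : ∀ t < n1, pvCh cs (i+t) = pvCh cs (i+t+1)) :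
    ∀ b ≤ n1, ∀ a ≤ b, pvCh cs (i+a) = pvCh cs (i+b) := by
  intro b
  induction b with
  | zero => intro _ a ha; interval_cases a; rfl
  | succ b ih =>
    intro hb a ha
    rcases Nat.lt_succ_iff_lt_or_eq.mp (Nat.lt_succ_of_le ha) with h' | h'
    · have h' : a ≤ b := by omega
      calc pvCh cs (i+a) = pvCh cs (i+b) := ih (by omega) a (by omega)
        _ = pvCh cs (i+(b+1)) := by
          have hb' := h b (by omega)
          rw [show i + (b+1) = i + b + 1 from rfl]
          exact hb'
    · subst h'; rfl

theorem pvW_iff (cs : List Char) (n1 i : Nat) (hn1 : 1 ≤ n1) :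
    pvW cs n1 i = true ↔
      ((∀ t < n1, pvCh cs (i+t) = pvCh cs (i+t+1)) ∧ pvOk (pvCh cs (i + n1)) = true) := by
  simp only [pvW, List.all_eq_true, List.mem_range, pvCond, Bool.and_eq_true, beq_iff_eq]
  constructor
  · intro h
    refine ⟨fun t ht => (h t ht).1, ?_⟩
    have := (h (n1-1) (by omega)).2
    have he : i + (n1-1) + 1 = i + n1 := by omega
    rwa [he] at this
  · rintro ⟨heq, hok⟩
    intro t ht
    refine ⟨heq t ht, ?_⟩
    have := pvChain cs i n1 heq n1 le_rfl (t+1) (by omega)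
    rw [show i + t + 1 = i + (t+1) by omega, this]
    exact hok

-- === the A side ===

theorem pvCondA_eq (a b : Char) :
    (((a == b) && (b == 'O')) || ((a == b) && (b == 'X'))) = ((a == b) && ((b == 'O') || (b == 'X'))) := by
  cases h : a == b <;> simp

theorem scanAInner_none (cs : List Char) (i n : Int) :
    ∀ (L : Nat) (j0 x : Int), x + L < n →
      scanAInner cs i n x (PySem.List.pyRange j0 (j0 + L)) = none := by
  intro L
  induction L with
  | zero =>
    intro j0 x _
    simp [PySem.List.pyRange_one, scanAInner]
  | succ L ih =>
    intro j0 x hx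
    rw [PySem.List.pyRange_one_cons (by omega)]
    simp only [scanAInner]
    have hrest : j0 + ((L:Int)+1) = (j0+1) + (L:Int) := by ring
    push_cast at hrest ⊢
    rw [hrest]
    split
    · rw [if_neg (by simp; omega)]
      exact ih (j0+1) (x+1) (by omega)
    · exact ih (j0+1) x (by omega)

theorem scanAInner_eq (cs : List Char) (i n : Int) (hi : 0 ≤ i) :
    ∀ (L : Nat) (j0 x : Int), 1 ≤ L → 1 ≤ x → 0 ≤ j0 → x + L = n →
      scanAInner cs i n x (PySem.List.pyRange j0 (j0 + L)) =
        (if (List.range L).all (fun t => pvCond cs ((i+j0).toNat + t)) then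
          some (pvOut (pvCh cs ((i+j0).toNat + L)))
         else none) := by
  intro L
  induction L with
  | zero => omega
  | succ L ih =>
    intro j0 x _ hx hj0 hxn
    rw [PySem.List.pyRange_one_cons (by omega)]
    simp only [scanAInner]
    have hget : ∀ (k : Int), 0 ≤ k → PySem.List.pyGetD cs k ' ' = pvCh cs k.toNat := by
      intro k hk; rw [PySem.List.pyGetD_of_nonneg cs ' ' hk]; rfl
    have h1 : (j0 + i).toNat = (i + j0).toNat := by omega
    have h2 : (j0 + i + 1).toNat = (i + j0).toNat + 1 := by omega
    rw [hget (j0+i) (by omega), hget (j0+i+1) (by omega), hget (i+j0) (by omega), h1, h2]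
    rw [pvCondA_eq]
    have hrange : (List.range (L+1)).all (fun t => pvCond cs ((i+j0).toNat + t)) =
        (pvCond cs ((i+j0).toNat) &&
          (List.range L).all (fun t => pvCond cs ((i+(j0+1)).toNat + t))) := by
      rw [List.range_succ_eq_map]
      simp only [List.all_cons, List.all_map, Nat.add_zero]
      congr 1
      refine congrArg (List.range L).all (funext fun t => ?_)
      simp only [Function.comp_apply]
      have ht : (i+j0).toNat + Nat.succ t = (i+(j0+1)).toNat + t := by omega
      rw [ht]
    by_cases hc : pvCond cs ((i+j0).toNat) = true
    · rw [if_pos (by unfold pvCond pvOk at hc; exact hc)]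
      by_cases hL : L = 0
      · subst hL
        rw [if_pos (by simp; omega)]
        rw [hrange]
        simp only [List.range_zero, List.all_nil, Bool.and_true, hc, if_pos]
        simp only [pvOut, Option.some.injEq, Prod.mk.injEq, true_and]
        simp only [pvCond, Bool.and_eq_true, beq_iff_eq] at hc
        rw [hc.1]
      · rw [if_neg (by simp; omega)]
        have hcast : j0 + ((L:Int)+1) = (j0+1) + (L:Int) := by ring
        push_cast
        rw [hcast]
        rw [ih (j0+1) (x+1) (by omega) (by omega) (by omega) (by push_cast at hxn ⊢; omega)]
        rw [hrange]
        simp only [hc, Bool.true_and]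
        have h4 : (i+(j0+1)).toNat + L = (i+j0).toNat + (L+1) := by omega
        rw [h4]
    · rw [if_neg (by unfold pvCond pvOk at hc; exact hc)]
      rw [hrange]
      simp only [hc, Bool.false_and, if_neg Bool.false_ne_true]
      have hcast : j0 + ((L:Int)+1) = (j0+1) + (L:Int) := by ring
      push_cast
      rw [hcast]
      exact scanAInner_none cs i n L (j0+1) x (by push_cast at hxn ⊢; omega)

theorem scanAOuter_eq (cs : List Char) (n : Int) (hn : 2 ≤ n) :
    ∀ (M : Nat) (i0 : Int), 0 ≤ i0 →
      scanAOuter cs n (PySem.List.pyRange i0 (i0 + M)) = pvAFind cs (n-1).toNat i0.toNat M := by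
  intro M
  induction M with
  | zero =>
    intro i0 _
    simp [PySem.List.pyRange_one, scanAOuter, pvAFind]
  | succ M ih =>
    intro i0 hi0
    rw [PySem.List.pyRange_one_cons (by omega)]
    simp only [scanAOuter]
    have hL : (0:Int) + ((n-1).toNat : Int) = n - 1 := by omega
    have hinner := scanAInner_eq cs i0 n hi0 (n-1).toNat 0 1 (by omega) le_rfl le_rfl (by omega)
    rw [hL] at hinner
    rw [hinner]
    have hi00 : (i0 + 0).toNat = i0.toNat := by omega
    rw [hi00]
    by_cases hw : ((List.range (n-1).toNat).all fun t => pvCond cs (i0.toNat + t)) = true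
    · rw [if_pos hw]
      simp only [pvAFind, pvW]
      rw [if_pos hw]
    · rw [if_neg hw]
      simp only [pvAFind, pvW]
      rw [if_neg hw]
      have hcast : i0 + ((M:Int)+1) = (i0+1) + (M:Int) := by ring
      push_cast
      rw [hcast, ih (i0+1) (by omega)]
      congr 1
      omega

-- === the B side ===

theorem scanBLoop_eq (cs : List Char) (n : Int) (n1 : Nat) (hn : n = (n1:Int) + 1) :
    ∀ (rest : List Char) (q : Nat), rest = cs.drop (q+1) → q < cs.length →
      scanBLoop n ((pvRun cs q : Nat) : Int) (pvCh cs q) rest = pvBFind cs n1 (q+1) := by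
  intro rest
  induction rest with
  | nil =>
    intro q hrest _
    have hlen2 : cs.length ≤ q + 1 := List.drop_eq_nil_iff.mp hrest.symm
    rw [pvBFind]
    rw [dif_neg (by omega)]
    simp [scanBLoop]
  | cons c rest' ih =>
    intro q hrest hq
    have hlt : q + 1 < cs.length := by
      by_contra h
      rw [List.drop_eq_nil_of_le (by omega)] at hrest
      simp at hrest
    have hdrop := List.drop_eq_getElem_cons (l := cs) (i := q+1) hlt
    rw [hdrop] at hrest
    have hc : c = pvCh cs (q+1) := by
      have := hrest
      simp only [List.cons.injEq] at this
      rw [this.1, pvCh, List.getD_eq_getElem cs ' ' hlt]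
    have hrest' : rest' = cs.drop (q+2) := by
      simp only [List.cons.injEq] at hrest
      exact hrest.2
    simp only [scanBLoop]
    have hrun : (if c == pvCh cs q then ((pvRun cs q : Nat) : Int) + 1 else 1)
        = ((pvRun cs (q+1) : Nat) : Int) := by
      rw [hc]
      simp only [pvRun]
      split <;> push_cast <;> ring
    rw [hrun]
    rw [pvBFind, dif_pos hlt]
    by_cases hcond : n1 + 1 ≤ pvRun cs (q+1) ∧ pvOk (pvCh cs (q+1)) = true
    · rw [if_pos hcond]
      rw [if_pos (by rw [hc, hn]; exact ⟨by push_cast; omega, by simpa [pvOk] using hcond.2⟩)]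
      rw [hc]; rfl
    · rw [if_neg hcond]
      rw [if_neg (by
        rw [hc, hn]
        intro hcon
        exact hcond ⟨by have := hcon.1; push_cast at this ⊢; omega, by simpa [pvOk] using hcon.2⟩)]
      rw [hc]
      exact ih (q+1) hrest' hlt

-- === the bridge ===

theorem pvBFind_ge (cs : List Char) (n1 q : Nat) (h : cs.length ≤ q) :
    pvBFind cs n1 q = (false, "*") := by
  rw [pvBFind, dif_neg (by omega)]

theorem pvBFind_skip (cs : List Char) (n1 : Nat) :
    ∀ (k q : Nat), q + k = n1 → pvBFind cs n1 q = pvBFind cs n1 n1 := by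
  intro k
  induction k with
  | zero => intro q hq; rw [show q = n1 by omega]
  | succ k ih =>
    intro q hq
    by_cases hlen : q < cs.length
    · rw [pvBFind, dif_pos hlen]
      rw [if_neg (by
        rintro ⟨h1, _⟩
        have := pvRun_le cs q
        omega)]
      exact ih (q+1) (by omega)
    · rw [pvBFind_ge cs n1 q (by omega), pvBFind_ge cs n1 n1 (by omega)]

theorem pvAFind_eq_pvBFind (cs : List Char) (n1 : Nat) (hn1 : 1 ≤ n1) :
    ∀ (M i : Nat), i + M = cs.length - n1 → pvAFind cs n1 i M = pvBFind cs n1 (i + n1) := by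
  intro M
  induction M with
  | zero =>
    intro i hi
    rw [pvBFind_ge cs n1 (i + n1) (by omega)]
    rfl
  | succ M ih =>
    intro i hi
    have hlen : i + n1 < cs.length := by omega
    simp only [pvAFind]
    rw [pvBFind, dif_pos hlen]
    have hiff : (n1 + 1 ≤ pvRun cs (i + n1) ∧ pvOk (pvCh cs (i + n1)) = true) ↔ pvW cs n1 i = true := by
      rw [pvW_iff cs n1 i hn1, pvRun_ge_iff cs i n1]
    by_cases hw : pvW cs n1 i = true
    · rw [if_pos hw, if_pos (hiff.mpr hw)]
    · rw [if_neg hw, if_neg (fun hcon => hw (hiff.mp hcon))]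
      rw [show i + n1 + 1 = (i+1) + n1 by omega]
      exact ih (i+1) (by omega)

theorem pvScanB_top (cs : List Char) (n : Int) (n1 : Nat) (hn : n = (n1:Int) + 1) :
    (match cs with
      | [] => (false, "*")
      | c :: rest => scanBLoop n 1 c rest) = pvBFind cs n1 1 := by
  cases cs with
  | nil => rw [pvBFind_ge _ _ 1 (by simp)]
  | cons c rest =>
    show scanBLoop n 1 c rest = pvBFind (c::rest) n1 1
    have h := scanBLoop_eq (c::rest) n n1 hn rest 0 (by simp) (by simp)
    simpa [pvRun, pvCh] using h

-- === degenerate n < 2 ===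

theorem scanAOuter_small (cs : List Char) (n : Int) (hn : n < 2) :
    ∀ l : List Int, scanAOuter cs n l = (false, "*") := by
  intro l
  induction l with
  | nil => rfl
  | cons i is ih =>
    simp only [scanAOuter]
    have : PySem.List.pyRange 0 (n-1) = [] := by
      rw [PySem.List.pyRange_one]
      rw [show (n-1-0).toNat = 0 by omega]
      rfl
    rw [this]
    simpa [scanAInner] using ih

-- ===== VERDICT (by name: the statement is the Claim_ definition above) =====
theorem scan_rad_spec : Claim_equal_scan_rad := by
  intro rad n _
  unfold Spec_scan_rad scan_rad scan_rad_alt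
  by_cases hn : n < 2
  · rw [if_pos hn]
    exact scanAOuter_small rad.toList n hn _
  · rw [if_neg hn]
    replace hn : 2 ≤ n := by omega
    set cs := rad.toList with hcs
    set n1 := (n-1).toNat with hn1
    have hn1' : 1 ≤ n1 := by omega
    have hlen : PySem.Str.len rad = (cs.length : Int) := by
      rw [PySem.Str.len_eq]
    rw [hlen]
    have hM : ((cs.length : Int) - n + 1) = 0 + (((cs.length + 1 - n.toNat : Nat)) : Int) ∨
        ((cs.length : Int) - n + 1) < 0 := by omega
    have houter : scanAOuter cs n (PySem.List.pyRange 0 ((cs.length : Int) - n + 1)) =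
        pvAFind cs n1 0 (cs.length + 1 - n.toNat) := by
      rcases hM with hM | hM
      · rw [hM, scanAOuter_eq cs n hn _ 0 le_rfl]
        rfl
      · have : PySem.List.pyRange 0 ((cs.length : Int) - n + 1) = [] := by
          rw [PySem.List.pyRange_one]
          rw [show ((cs.length : Int) - n + 1 - 0).toNat = 0 by omega]
          rfl
        rw [this]
        rw [show cs.length + 1 - n.toNat = 0 by omega]
        rfl
    rw [houter]
    have hM0 : cs.length + 1 - n.toNat = cs.length - n1 := by omega
    rw [hM0]
    rw [pvAFind_eq_pvBFind cs n1 hn1' (cs.length - n1) 0 (by omega)]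
    rw [show 0 + n1 = n1 from by omega]
    rw [← pvBFind_skip cs n1 (n1 - 1) 1 (by omega)]
    exact (pvScanB_top cs n n1 (by omega)).symm
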